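-- pv_equiv track=rewrite | github.com/relaernu/sudoku | sudoku.py | LogicOr
-- ===== SOURCE A (Python) =====
-- def LogicOr(list1, list2):
--     list1.sort()
--     list2.sort()
--     orset = []
--     for l1 in list1:
--         if l1 != 0:
--             if not l1 in orset:
--                 orset.append(l1)
--     for l2 in list2:
--         if l2 != 0:
--             if not l2 in orset:
--                 orset.append(l2)
--     orset.sort()
--     return orset
-- ===== SOURCE B (Python) =====
-- def LogicOr(list1, list2):
--     list1.sort()
--     list2.sort()
--     out = []
--     i, j = 0, 0
--     n, m = len(list1), len(list2)
--     while i < n or j < m: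
--         if j >= m or (i < n and list1[i] <= list2[j]):
--             v = list1[i]
--             i += 1
--         else:
--             v = list2[j]
--             j += 1
--         if v != 0 and (not out or out[-1] != v):
--             out.append(v)
--     return out
-- ===== Notes on version B (the rewrite author's own statement) =====
-- stated objective: faster
-- what changed: A collects nonzero values into a dedup list via linear membership scans (quadratic in the number of distinct values) and then sorts that list; B does a two-pointer merge of the two sorted inputs, skipping zeros and values equal to the last emitted one, so the output is produced already sorted and distinct in one pass.
import Mathlib
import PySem

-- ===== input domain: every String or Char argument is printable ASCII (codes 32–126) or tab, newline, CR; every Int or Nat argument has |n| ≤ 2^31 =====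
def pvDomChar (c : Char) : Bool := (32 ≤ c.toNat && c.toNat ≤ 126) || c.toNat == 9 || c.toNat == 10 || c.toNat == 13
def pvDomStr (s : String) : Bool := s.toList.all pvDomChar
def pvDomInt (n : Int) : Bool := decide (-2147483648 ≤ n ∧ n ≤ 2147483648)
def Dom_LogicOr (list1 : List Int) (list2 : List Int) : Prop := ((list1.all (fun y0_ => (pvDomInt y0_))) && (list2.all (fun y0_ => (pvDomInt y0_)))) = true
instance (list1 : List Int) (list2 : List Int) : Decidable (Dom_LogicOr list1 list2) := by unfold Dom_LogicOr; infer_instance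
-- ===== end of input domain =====

-- B replaces A's build-dedup-list-then-sort with a two-pointer merge of the two sorted
-- lists that skips zeros and duplicates on the fly (objective: alternative). Both A and B
-- sort their arguments in place in Python; the equivalence proved here is about the return value.

-- ===== PORT A =====
def LogicOr (list1 : List Int) (list2 : List Int) : List Int :=
  let l1 := PySem.List.sorted list1 (fun x => x) false
  let l2 := PySem.List.sorted list2 (fun x => x) false
  let orset : List Int :=
    l1.foldl (fun acc v => if v ≠ 0 then (if ¬ v ∈ acc then acc ++ [v] else acc) else acc) []
  let orset :=
    l2.foldl (fun acc v => if v ≠ 0 then (if ¬ v ∈ acc then acc ++ [v] else acc) else acc) orset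
  PySem.List.sorted orset (fun x => x) false

-- ===== PORT B =====
-- the head of the while loop of Source B: which pointer advances, i.e. the chosen value v
-- and the two remaining streams (none when both streams are exhausted)
def pickMin : List Int → List Int → Option (Int × List Int × List Int)
  | [], [] => none
  | x :: xs, [] => some (x, xs, [])
  | [], y :: ys => some (y, [], ys)
  | x :: xs, y :: ys => if x ≤ y then some (x, xs, y :: ys) else some (y, x :: xs, ys)

theorem pickMin_length {xs ys xs' ys' : List Int} {v : Int}
    (hp : pickMin xs ys = some (v, xs', ys')) : xs'.length + ys'.length < xs.length + ys.length := by
  match xs, ys with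
  | [], [] => simp [pickMin] at hp
  | x :: xs, [] => simp [pickMin] at hp; obtain ⟨-, rfl, rfl⟩ := hp; simp
  | [], y :: ys => simp [pickMin] at hp; obtain ⟨-, rfl, rfl⟩ := hp; simp
  | x :: xs, y :: ys =>
    simp only [pickMin] at hp
    split at hp <;> (simp at hp; obtain ⟨-, rfl, rfl⟩ := hp; simp)

-- the while loop of Source B; `last` plays the role of out[-1] (none while out is empty)
def mergeND (xs ys : List Int) (last : Option Int) : List Int :=
  match h : pickMin xs ys with
  | none => []
  | some (v, xs', ys') =>
      if v ≠ 0 ∧ some v ≠ last then v :: mergeND xs' ys' (some v)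
      else mergeND xs' ys' last
  termination_by xs.length + ys.length
  decreasing_by all_goals exact pickMin_length h

def LogicOr_alt (list1 : List Int) (list2 : List Int) : List Int :=
  mergeND (PySem.List.sorted list1 (fun x => x) false)
          (PySem.List.sorted list2 (fun x => x) false) none

-- ===== PRECONDITION & SPEC =====
def Spec_LogicOr (list1 : List Int) (list2 : List Int) (out : List Int) : Prop := out = LogicOr_alt list1 list2
instance (list1 : List Int) (list2 : List Int) (out : List Int) : Decidable (Spec_LogicOr list1 list2 out) := by unfold Spec_LogicOr; infer_instance

-- ===== CLAIM (what is proved, stated in full; the proofs are below) =====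
def Claim_equal_LogicOr : Prop := ∀ (list1 : List Int) (list2 : List Int), Dom_LogicOr list1 list2 → Spec_LogicOr list1 list2 (LogicOr list1 list2)

-- ===== LEMMAS AND PROOFS =====

-- A's dedup-append loop: membership of the accumulator
theorem foldl_dedup_mem (xs : List Int) (acc : List Int) (a : Int) :
    a ∈ xs.foldl (fun acc v => if v ≠ 0 then (if ¬ v ∈ acc then acc ++ [v] else acc) else acc) acc ↔
      a ∈ acc ∨ (a ∈ xs ∧ a ≠ 0) := by
  induction xs generalizing acc with
  | nil => simp
  | cons x xs ih =>
    simp only [List.foldl_cons]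
    by_cases hx : x = 0
    · subst hx
      simp only [ne_eq, not_true_eq_false, if_false, ih, List.mem_cons]
      tauto
    · simp only [ne_eq, hx, not_false_eq_true, if_true]
      by_cases hm : x ∈ acc
      · simp only [hm, not_true_eq_false, if_false, ih, List.mem_cons]
        constructor
        · tauto
        · rintro (h | ⟨(h | h), hne⟩)
          · tauto
          · exact Or.inl (h ▸ hm)
          · tauto
      · simp only [hm, not_false_eq_true, if_true, ih, List.mem_append, List.mem_cons,
          List.not_mem_nil, or_false]
        constructor
        · rintro ((h | h) | h)
          · tauto
          · subst h; exact Or.inr ⟨Or.inl rfl, hx⟩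
          · tauto
        · rintro (h | ⟨(h | h), hne⟩)
          · tauto
          · subst h; exact Or.inl (Or.inr rfl)
          · tauto

-- A's dedup-append loop keeps the accumulator duplicate-free
theorem foldl_dedup_nodup (xs : List Int) (acc : List Int) (h : acc.Nodup) :
    (xs.foldl (fun acc v => if v ≠ 0 then (if ¬ v ∈ acc then acc ++ [v] else acc) else acc) acc).Nodup := by
  induction xs generalizing acc with
  | nil => exact h
  | cons x xs ih =>
    simp only [List.foldl_cons]
    by_cases hx : x = 0
    · subst hx; simpa using ih acc h
    · simp only [ne_eq, hx, not_false_eq_true, if_true]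
      by_cases hm : x ∈ acc
      · simp only [hm, not_true_eq_false, if_false]; exact ih acc h
      · simp only [hm, not_false_eq_true, if_true]
        refine ih _ ?_
        rw [List.nodup_append]
        refine ⟨h, List.nodup_singleton x, ?_⟩
        intro a ha b hb
        simp only [List.mem_singleton] at hb
        subst hb
        exact fun hax => hm (hax ▸ ha)

-- one step of the merge: the chosen v is a least remaining element
theorem pickMin_spec {xs ys xs' ys' : List Int} {v : Int}
    (h : pickMin xs ys = some (v, xs', ys'))
    (hx : xs.Pairwise (· ≤ ·)) (hy : ys.Pairwise (· ≤ ·)) :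
    xs'.Pairwise (· ≤ ·) ∧ ys'.Pairwise (· ≤ ·) ∧
      (v ∈ xs ∨ v ∈ ys) ∧
      (∀ a, v = a ∨ a ∈ xs' ∨ a ∈ ys' ↔ a ∈ xs ∨ a ∈ ys) ∧
      (∀ a, a ∈ xs' ∨ a ∈ ys' → v ≤ a) := by
  match xs, ys with
  | [], [] => simp [pickMin] at h
  | x :: xs, [] =>
    simp only [pickMin, Option.some.injEq, Prod.mk.injEq] at h
    obtain ⟨rfl, rfl, rfl⟩ := h
    refine ⟨hx.tail, by simp, by simp, by simp [eq_comm], ?_⟩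
    intro a ha
    rcases ha with ha | ha
    · exact List.rel_of_pairwise_cons hx ha
    · simp at ha
  | [], y :: ys =>
    simp only [pickMin, Option.some.injEq, Prod.mk.injEq] at h
    obtain ⟨rfl, rfl, rfl⟩ := h
    refine ⟨by simp, hy.tail, by simp, by simp [eq_comm], ?_⟩
    intro a ha
    rcases ha with ha | ha
    · simp at ha
    · exact List.rel_of_pairwise_cons hy ha
  | x :: xs, y :: ys =>
    simp only [pickMin] at h
    split at h <;> rename_i hle <;>
      (simp only [Option.some.injEq, Prod.mk.injEq] at h; obtain ⟨rfl, rfl, rfl⟩ := h)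
    · refine ⟨hx.tail, hy, by simp, by simp [eq_comm]; tauto, ?_⟩
      intro a ha
      rcases ha with ha | ha
      · exact List.rel_of_pairwise_cons hx ha
      · rcases List.mem_cons.mp ha with rfl | ha
        · exact hle
        · exact le_trans hle (List.rel_of_pairwise_cons hy ha)
    · refine ⟨hx, hy.tail, by simp, by simp [eq_comm]; tauto, ?_⟩
      intro a ha
      have hyx : y ≤ x := by omega
      rcases ha with ha | ha
      · rcases List.mem_cons.mp ha with rfl | ha
        · exact hyx
        · exact le_trans hyx (List.rel_of_pairwise_cons hx ha)
      · exact List.rel_of_pairwise_cons hy ha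

-- the merge loop: strictly increasing output with the expected membership
theorem mergeND_spec (xs ys : List Int) (last : Option Int)
    (hx : xs.Pairwise (· ≤ ·)) (hy : ys.Pairwise (· ≤ ·))
    (hl : ∀ l, last = some l → ∀ a, (a ∈ xs ∨ a ∈ ys) → l ≤ a) :
    (mergeND xs ys last).Pairwise (· < ·) ∧
      (∀ a, a ∈ mergeND xs ys last ↔ a ≠ 0 ∧ (a ∈ xs ∨ a ∈ ys) ∧ some a ≠ last) := by
  rw [mergeND]
  split
  · rename_i hnone
    have hxe : xs = [] ∧ ys = [] := by
      match xs, ys with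
      | [], [] => exact ⟨rfl, rfl⟩
      | x :: xs, [] => simp [pickMin] at hnone
      | [], y :: ys => simp [pickMin] at hnone
      | x :: xs, y :: ys => simp only [pickMin] at hnone; split at hnone <;> simp at hnone
    simp [hxe.1, hxe.2]
  · rename_i v xs' ys' hpick
    obtain ⟨hx', hy', hvmem, hiff, hvle⟩ := pickMin_spec hpick hx hy
    have hlen := pickMin_length hpick
    split
    · rename_i hc
      obtain ⟨hv0, hvlast⟩ := hc
      have ih := mergeND_spec xs' ys' (some v) hx' hy'
        (by rintro l hl' a ha; injection hl' with hl'; subst hl'; exact hvle a ha)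
      constructor
      · refine List.pairwise_cons.mpr ⟨?_, ih.1⟩
        intro b hb
        obtain ⟨hb0, hbm, hbne⟩ := (ih.2 b).mp hb
        have : v ≤ b := hvle b hbm
        have : b ≠ v := fun h => hbne (by rw [h])
        omega
      · intro a
        simp only [List.mem_cons, ih.2 a]
        constructor
        · rintro (rfl | ⟨h0, hm, hne⟩)
          · exact ⟨hv0, hvmem, hvlast⟩
          · refine ⟨h0, (hiff a).mp (Or.inr hm), ?_⟩
            rintro rfl
            have h1 : a ≤ v := hl a rfl v hvmem
            have h2 : v ≤ a := hvle a hm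
            have : a = v := le_antisymm h1 h2
            exact hne (by rw [this])
        · rintro ⟨h0, hm, hne⟩
          rcases (hiff a).mpr hm with rfl | hm'
          · exact Or.inl rfl
          · by_cases hav : a = v
            · exact Or.inl hav
            · exact Or.inr ⟨h0, hm', fun h => hav (by injection h)⟩
    · rename_i hc
      rw [not_and_or, not_not, not_ne_iff] at hc
      have ih := mergeND_spec xs' ys' last hx' hy'
        (by rintro l rfl a ha; exact hl l rfl a ((hiff a).mp (Or.inr ha)))
      refine ⟨ih.1, fun a => ?_⟩
      rw [ih.2 a]
      constructor
      · rintro ⟨h0, hm, hne⟩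
        exact ⟨h0, (hiff a).mp (Or.inr hm), hne⟩
      · rintro ⟨h0, hm, hne⟩
        rcases (hiff a).mpr hm with rfl | hm'
        · rcases hc with hc | hc
          · exact absurd hc h0
          · exact absurd hc hne
        · exact ⟨h0, hm', hne⟩
  termination_by xs.length + ys.length
  decreasing_by all_goals omega

-- ===== VERDICT (by name: the statement is the Claim_ definition above) =====
theorem LogicOr_spec : Claim_equal_LogicOr := by
  intro list1 list2 _
  unfold Spec_LogicOr LogicOr LogicOr_alt
  set l1 := PySem.List.sorted list1 (fun x => x) false with hl1
  set l2 := PySem.List.sorted list2 (fun x => x) false with hl2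
  have hp1 : l1.Pairwise (· ≤ ·) := PySem.List.sorted_pairwise list1 (fun x => x)
  have hp2 : l2.Pairwise (· ≤ ·) := PySem.List.sorted_pairwise list2 (fun x => x)
  have hmerge := mergeND_spec l1 l2 none hp1 hp2 (by simp)
  set R := mergeND l1 l2 none with hR
  set orset := l2.foldl
      (fun acc v => if v ≠ 0 then (if ¬ v ∈ acc then acc ++ [v] else acc) else acc)
      (l1.foldl (fun acc v => if v ≠ 0 then (if ¬ v ∈ acc then acc ++ [v] else acc) else acc) [])
    with horset
  have hOmem : ∀ a, a ∈ orset ↔ a ≠ 0 ∧ (a ∈ l1 ∨ a ∈ l2) := by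
    intro a
    rw [horset, foldl_dedup_mem, foldl_dedup_mem]
    simp; tauto
  have hOnd : orset.Nodup :=
    foldl_dedup_nodup l2 _ (foldl_dedup_nodup l1 [] (List.nodup_nil))
  have hRnd : R.Nodup := hmerge.1.imp (fun h => ne_of_lt h)
  have hperm : R.Perm orset := by
    rw [List.perm_ext_iff_of_nodup hRnd hOnd]
    intro a
    rw [hOmem a, hmerge.2 a]
    simp
  show (PySem.List.sorted orset (fun x => x) false) = R
  exact PySem.List.sorted_eq_of_perm_of_pairwise_lt orset R (fun x => x) hperm hmerge.1
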